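-- pv_equiv track=rewrite | github.com/leonedott/ven_name_generator | ven_name/toolbox_primer_nombre.py | exc_05
-- ===== SOURCE A (Python) =====
-- vocales = set('aeiou')
--
-- def exc_05(variable, choice):
--     '''
--     EN: Exceptions for the last syllable.
--     ES: Excepciones para la elección de la sílaba final.
--     '''
--     para_s = ['ngel', 'xon', 'ng']
--     para_n= ['kh', 'gh']
--     para_l= ['kh', 'gh', 'y']
--     para_y = ['y']
--     para_cons= ['nkh', 'ngh', 'ng', 'nk']
--     if variable[-1] == choice[0]:
--         return False
--     elif variable[-1] == 's' and any(x in choice for x in para_s):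
--         return False
--     elif variable[-1] == 'n' and any(x in choice for x in para_n):
--         return False
--     elif variable[-1] == 'l' and any(x in choice for x in para_l):
--         return False
--     elif variable[-1] == 'y' and any(x in choice for x in para_y):
--         return False
--     elif variable[-1] not in vocales and any(x in choice for x in para_cons):
--         return False
--     else:
--         return True
--     pass
-- ===== SOURCE B (Python) =====
-- vocales = set('aeiou')
--
-- def exc_05(variable, choice):
--     '''
--     EN: Exceptions for the last syllable.
--     ES: Excepciones para la eleccion de la silaba final.
--     '''
--     last = variable[-1]
--     if last == choice[0]:
--         return False
--     rules = [('ngel', ('s',)), ('xon', ('s',)), ('ng', ('s',)),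
--              ('kh', ('n', 'l')), ('gh', ('n', 'l')), ('y', ('l', 'y')),
--              ('nkh', None), ('ngh', None), ('ng', None), ('nk', None)]
--     active = [p for p, enders in rules
--               if (last in enders if enders is not None else last not in vocales)]
--     for i in range(len(choice)):
--         if any(choice.startswith(p, i) for p in active):
--             return False
--     return True
-- ===== Notes on version B (the rewrite author's own statement) =====
-- stated objective: alternative
-- what changed: Replaces the ordered elif cascade of per-pattern 'x in choice' substring searches by a reverse rule table (pattern -> ending letters it applies to) and a single left-to-right position scan of choice testing startswith at each index.
import Mathlib
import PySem

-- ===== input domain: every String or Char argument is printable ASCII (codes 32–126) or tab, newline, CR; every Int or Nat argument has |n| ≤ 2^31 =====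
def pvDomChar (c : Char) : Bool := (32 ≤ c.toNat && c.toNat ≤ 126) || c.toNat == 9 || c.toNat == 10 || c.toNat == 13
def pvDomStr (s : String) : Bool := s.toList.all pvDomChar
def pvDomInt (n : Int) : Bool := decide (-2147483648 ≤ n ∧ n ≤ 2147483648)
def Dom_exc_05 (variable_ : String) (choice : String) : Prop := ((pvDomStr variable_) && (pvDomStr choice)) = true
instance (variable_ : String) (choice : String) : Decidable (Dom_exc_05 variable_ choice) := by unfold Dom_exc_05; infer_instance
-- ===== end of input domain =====

-- B replaces A's per-pattern substring searches (five ordered elif branches, each doing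
-- 'x in choice' scans) by one left-to-right position scan of choice that tests, at each index,
-- whether any rule active for the ending letter starts there; objective: alternative.

-- ===== PORT A =====
-- vocales = set('aeiou')  (module-level constant, shared by both ports as in the Python module)
def pvVocales : List Char := PySem.Set.ofList "aeiou".toList

def exc_05 (variable_ : String) (choice : String) : Bool :=
  let para_s := ["ngel", "xon", "ng"]
  let para_n := ["kh", "gh"]
  let para_l := ["kh", "gh", "y"]
  let para_y := ["y"]
  let para_cons := ["nkh", "ngh", "ng", "nk"]
  match PySem.Str.pyGet? variable_ (-1), PySem.Str.pyGet? choice 0 with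
  | some last, some c0 =>
    if last == c0 then false
    else if last == 's' && para_s.any (fun x => PySem.Str.isIn x choice) then false
    else if last == 'n' && para_n.any (fun x => PySem.Str.isIn x choice) then false
    else if last == 'l' && para_l.any (fun x => PySem.Str.isIn x choice) then false
    else if last == 'y' && para_y.any (fun x => PySem.Str.isIn x choice) then false
    else if !(PySem.Set.contains pvVocales last) && para_cons.any (fun x => PySem.Str.isIn x choice) then false
    else true
  | _, _ => false   -- IndexError in Python (empty variable or choice); excluded by Pre_

-- ===== PORT B =====
-- choice.startswith(p, i) with 0 ≤ i is exactly Chars.startswith on the i-th suffix (drop i).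
def exc_05_alt (variable_ : String) (choice : String) : Bool :=
  match PySem.Str.pyGet? variable_ (-1) with
  | none => false   -- IndexError in Python (empty variable); excluded by Pre_
  | some last =>
    match PySem.Str.pyGet? choice 0 with
    | none => false   -- IndexError in Python (empty choice); excluded by Pre_
    | some c0 =>
    if last == c0 then false
    else
      let rules : List (List Char × Option (List Char)) :=
        [(['n','g','e','l'], some ['s']), (['x','o','n'], some ['s']), (['n','g'], some ['s']),
         (['k','h'], some ['n','l']), (['g','h'], some ['n','l']), (['y'], some ['l','y']),
         (['n','k','h'], none), (['n','g','h'], none), (['n','g'], none), (['n','k'], none)]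
      -- vocales = set('aeiou') (module-level constant), inlined below
      let active := (rules.filter (fun pe =>
          match pe.2 with
          | some enders => enders.contains last
          | none => !(PySem.Set.contains (PySem.Set.ofList "aeiou".toList) last))).map Prod.fst
      if (PySem.List.pyRange 0 (PySem.Str.len choice) 1).any (fun i =>
           active.any (fun p => PySem.Chars.startswith (choice.toList.drop i.toNat) p))
      then false else true

-- ===== PRECONDITION & SPEC =====
-- A evaluates variable[-1] and choice[0]: it raises IndexError iff either string is empty.
def Pre_exc_05 (variable_ : String) (choice : String) : Prop :=
  variable_.toList ≠ [] ∧ choice.toList ≠ []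
instance (variable_ : String) (choice : String) : Decidable (Pre_exc_05 variable_ choice) := by
  unfold Pre_exc_05; infer_instance
def pvWitness_exc_05 : String × String := ("an", "ka")

def Spec_exc_05 (variable_ : String) (choice : String) (out : Bool) : Prop := out = exc_05_alt variable_ choice
instance (variable_ : String) (choice : String) (out : Bool) : Decidable (Spec_exc_05 variable_ choice out) := by unfold Spec_exc_05; infer_instance

-- ===== CLAIM (what is proved, stated in full; the proofs are below) =====
def Claim_equal_exc_05 : Prop := ∀ (variable_ : String) (choice : String), Dom_exc_05 variable_ choice → Pre_exc_05 variable_ choice → Spec_exc_05 variable_ choice (exc_05 variable_ choice)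

-- ===== LEMMAS AND PROOFS =====
theorem pvPyGetLast (s : String) (h : s.toList ≠ []) : ∃ c, PySem.Str.pyGet? s (-1) = some c := by
  have hlt : s.length = s.toList.length := (String.length_toList (s := s)).symm
  have h0 : s.toList.length ≠ 0 := by simpa using h
  simp only [PySem.Str.pyGet?, PySem.Chars.pyGet?, PySem.List.pyGet?, PySem.List.pyIdx?]
  split <;> [omega; skip]
  split <;> [skip; omega]
  have hb : s.toList.length - (-(-1:Int)).toNat < s.toList.length := by omega
  exact ⟨_, by simp only [Option.bind_some]; exact List.getElem?_eq_getElem hb⟩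

theorem pvPyGetZero (s : String) (h : s.toList ≠ []) : ∃ c, PySem.Str.pyGet? s 0 = some c := by
  have hlt : s.length = s.toList.length := (String.length_toList (s := s)).symm
  have h0 : s.toList.length ≠ 0 := by simpa using h
  simp only [PySem.Str.pyGet?, PySem.Chars.pyGet?, PySem.List.pyGet?, PySem.List.pyIdx?]
  split <;> [skip; omega]
  split <;> [skip; omega]
  have hb : (Int.toNat 0) < s.toList.length := by omega
  exact ⟨_, by simp only [Option.bind_some]; exact List.getElem?_eq_getElem hb⟩

-- The outer position-scan and the inner pattern-scan commute (both are an ∃ over a pair).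
theorem pvAnySwap {α β : Type} (l : List α) (ps : List β) (g : α → β → Bool) :
    (l.any fun i => ps.any fun p => g i p) = (ps.any fun p => l.any fun i => g i p) := by
  rw [Bool.eq_iff_iff]
  simp only [List.any_eq_true]
  tauto

-- Scanning every start position for a nonempty pattern is Python's 'p in cs'.
theorem pvScanEq (cs p : List Char) (hp : p ≠ []) :
    ((PySem.List.pyRange 0 (cs.length : Int) 1).any fun i =>
        PySem.Chars.startswith (cs.drop i.toNat) p) = PySem.Chars.isIn p cs := by
  rw [Bool.eq_iff_iff]
  simp only [List.any_eq_true, PySem.List.mem_pyRange_one]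
  constructor
  · rintro ⟨i, ⟨_, _⟩, hs⟩
    exact (PySem.Chars.exists_prefix_drop_iff_isIn _ _).mp
      ⟨i.toNat, (PySem.Chars.startswith_iff _ _).mp hs⟩
  · intro h
    obtain ⟨j, hj⟩ := (PySem.Chars.exists_prefix_drop_iff_isIn _ _).mpr h
    have hjl : j < cs.length := by
      by_contra hge
      have hnil : cs.drop j = [] := List.drop_eq_nil_of_le (by omega)
      rw [hnil] at hj
      exact hp (List.prefix_nil.mp hj)
    refine ⟨(j : Int), ⟨by positivity, by exact_mod_cast hjl⟩, ?_⟩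
    exact (PySem.Chars.startswith_iff _ _).mpr (by simpa using hj)

-- ===== VERDICT (by name: the statement is the Claim_ definition above) =====
theorem pvScanAllStr (choice : String) (ps : List (List Char)) (hp : ∀ p ∈ ps, p ≠ []) :
    ((PySem.List.pyRange 0 (PySem.Str.len choice) 1).any fun i =>
        ps.any fun p => PySem.Chars.startswith (choice.toList.drop i.toNat) p)
      = ps.any (fun p => PySem.Chars.isIn p choice.toList) := by
  have hlen : (PySem.Str.len choice) = ((choice.toList.length : Nat) : Int) := by
    simp [PySem.Str.len_eq]
  rw [hlen, pvAnySwap]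
  exact PySem.List.any_congr_mem (fun p hp' => pvScanEq choice.toList p (hp p hp'))

theorem exc_05_spec : Claim_equal_exc_05 := by
  intro variable_ choice _hdom hpre
  obtain ⟨hv, hc⟩ := hpre
  obtain ⟨last, hl⟩ := pvPyGetLast variable_ hv
  obtain ⟨c0, h0⟩ := pvPyGetZero choice hc
  unfold Spec_exc_05 exc_05 exc_05_alt
  rw [hl, h0]
  dsimp only
  rw [pvScanAllStr choice]
  · by_cases hq : last = c0
    · simp [hq]
    · by_cases hs : last = 's'
      · subst hs
        simp [hq, pvVocales, PySem.Set.ofList]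
        cases PySem.Chars.isIn ['n','g','e','l'] choice.toList <;>
          cases PySem.Chars.isIn ['x','o','n'] choice.toList <;>
          cases PySem.Chars.isIn ['n','g'] choice.toList <;>
          cases PySem.Chars.isIn ['n','k','h'] choice.toList <;>
          cases PySem.Chars.isIn ['n','g','h'] choice.toList <;>
          cases PySem.Chars.isIn ['n','k'] choice.toList <;>
          simp
      · by_cases hn : last = 'n'
        · subst hn
          simp [hq, pvVocales, PySem.Set.ofList]
          cases PySem.Chars.isIn ['k','h'] choice.toList <;>
            cases PySem.Chars.isIn ['g','h'] choice.toList <;>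
            cases PySem.Chars.isIn ['n','k','h'] choice.toList <;>
            cases PySem.Chars.isIn ['n','g','h'] choice.toList <;>
            cases PySem.Chars.isIn ['n','g'] choice.toList <;>
            cases PySem.Chars.isIn ['n','k'] choice.toList <;>
            simp
        · by_cases hl2 : last = 'l'
          · subst hl2
            simp [hq, pvVocales, PySem.Set.ofList]
            cases PySem.Chars.isIn ['k','h'] choice.toList <;>
              cases PySem.Chars.isIn ['g','h'] choice.toList <;>
              cases PySem.Chars.isIn ['y'] choice.toList <;>
              cases PySem.Chars.isIn ['n','k','h'] choice.toList <;>
              cases PySem.Chars.isIn ['n','g','h'] choice.toList <;>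
              cases PySem.Chars.isIn ['n','g'] choice.toList <;>
              cases PySem.Chars.isIn ['n','k'] choice.toList <;>
              simp
          · by_cases hy : last = 'y'
            · subst hy
              simp [hq, pvVocales, PySem.Set.ofList]
            · by_cases hvw : last ∈ PySem.Set.ofList "aeiou".toList
              · have hv5 : last = 'a' ∨ last = 'e' ∨ last = 'i' ∨ last = 'o' ∨ last = 'u' := by
                  simpa [PySem.Set.ofList] using hvw
                rcases hv5 with h | h | h | h | h <;> subst h <;>
                  simp [hq, pvVocales, PySem.Set.ofList]
              · have hv5 : ¬last = 'a' ∧ ¬last = 'e' ∧ ¬last = 'i' ∧ ¬last = 'o' ∧ ¬last = 'u' := by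
                  simpa [PySem.Set.ofList] using hvw
                obtain ⟨v1, v2, v3, v4, v5⟩ := hv5
                simp [hq, hs, hn, hl2, hy, pvVocales, PySem.Set.ofList,
                  List.contains_eq_mem, v1, v2, v3, v4, v5]
  · intro p hp
    obtain ⟨pe, hpe, rfl⟩ := List.mem_map.mp hp
    have h1 := (List.mem_filter.mp hpe).1
    fin_cases h1 <;> simp
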